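-- pv_equiv track=rewrite | github.com/ariessunfeld/day-of-the-week-practice | dotw-practice.py | get_year_code
-- ===== SOURCE A (Python) =====
-- def get_year_code(year: int):
--     last_two_digits = year % 100
--     century = year // 100
--     century_code = (7 - (century%4)*2) % 7
--     leap_years = [x*4 for x in range(25)]
--     leap_year_codes = [(x*5)%7 for x in range(25)]
--     leap_year_idx = last_two_digits // 4
--     leap_year_diff = last_two_digits % 4
--     return (leap_year_codes[leap_year_idx] + leap_year_diff + century_code) % 7
-- ===== SOURCE B (Python) =====
-- def get_year_code(year: int):
--     # year code = century code advanced one step per elapsed year within the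
--     # century, with an extra step at each leap year -- no table is built.
--     code = (7 - (year // 100 % 4) * 2) % 7
--     for y in range(1, year % 100 + 1):
--         code += 1
--         if y % 4 == 0:
--             code += 1
--     return code % 7
-- ===== Notes on version B (the rewrite author's own statement) =====
-- stated objective: alternative
-- what changed: A builds a constant-size leap-year lookup table with list comprehensions and indexes into it; B builds no table at all and instead accumulates the year code iteratively, advancing it one step per elapsed year of the century with an extra step at each leap year.
import Mathlib
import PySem

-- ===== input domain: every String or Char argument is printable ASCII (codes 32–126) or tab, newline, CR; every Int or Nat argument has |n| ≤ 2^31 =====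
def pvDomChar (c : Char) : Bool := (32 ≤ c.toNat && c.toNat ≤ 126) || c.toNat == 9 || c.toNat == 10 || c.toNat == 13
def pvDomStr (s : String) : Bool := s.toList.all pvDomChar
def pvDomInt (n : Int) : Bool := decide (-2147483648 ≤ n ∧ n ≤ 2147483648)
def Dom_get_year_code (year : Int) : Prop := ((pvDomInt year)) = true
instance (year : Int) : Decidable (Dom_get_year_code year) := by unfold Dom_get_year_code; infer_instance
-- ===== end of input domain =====

-- B replaces A's precomputed 25-entry leap-year table by an iterative accumulation:
-- the year code advances one step per elapsed year of the century, plus one extra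
-- step at each leap year (objective: alternative; same O(1)-per-call spirit, no table).

-- ===== PORT A =====
-- the index into leap_year_codes is always in [0,25), so the lookup never raises;
-- pyGetD is exact here
def get_year_code (year : Int) : Int :=
  let last_two_digits := PySem.Int.mod year 100
  let century := PySem.Int.floordiv year 100
  let century_code := PySem.Int.mod (7 - (PySem.Int.mod century 4) * 2) 7
  let _leap_years := (PySem.List.pyRange 0 25 1).map (fun x => x * 4)
  let leap_year_codes := (PySem.List.pyRange 0 25 1).map (fun x => PySem.Int.mod (x * 5) 7)
  let leap_year_idx := PySem.Int.floordiv last_two_digits 4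
  let leap_year_diff := PySem.Int.mod last_two_digits 4
  PySem.Int.mod (PySem.List.pyGetD leap_year_codes leap_year_idx 0 + leap_year_diff + century_code) 7

-- ===== PORT B =====
def get_year_code_alt (year : Int) : Int :=
  let code := PySem.Int.mod (7 - (PySem.Int.mod (PySem.Int.floordiv year 100) 4) * 2) 7
  let code := (PySem.List.pyRange 1 (PySem.Int.mod year 100 + 1) 1).foldl
    (fun code y =>
      let code := code + 1
      if PySem.Int.mod y 4 = 0 then code + 1 else code) code
  PySem.Int.mod code 7

-- ===== PRECONDITION & SPEC =====
def Spec_get_year_code (year : Int) (out : Int) : Prop := out = get_year_code_alt year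
instance (year : Int) (out : Int) : Decidable (Spec_get_year_code year out) := by unfold Spec_get_year_code; infer_instance

-- ===== CLAIM (what is proved, stated in full; the proofs are below) =====
def Claim_equal_get_year_code : Prop := ∀ (year : Int), Dom_get_year_code year → Spec_get_year_code year (get_year_code year)

-- ===== LEMMAS AND PROOFS =====

-- the table leap_year_codes[i] is exactly (i*5) % 7 for 0 ≤ i < 25
theorem pv_code_lookup (i : Int) (h0 : 0 ≤ i) (h1 : i < 25) :
    PySem.List.pyGetD ((PySem.List.pyRange 0 25 1).map (fun x => PySem.Int.mod (x * 5) 7)) i 0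
      = PySem.Int.mod (i * 5) 7 := by
  interval_cases i <;> decide

-- B's loop, started at c, ends at c + n + n/4 (one step per year, extra at leap years)
theorem pv_loop_sum (k : Nat) (c : Int) :
    (PySem.List.pyRange 1 ((k : Int) + 1) 1).foldl
      (fun code y =>
        let code := code + 1
        if PySem.Int.mod y 4 = 0 then code + 1 else code) c
      = c + k + (k : Int) / 4 := by
  induction k generalizing c with
  | zero => simp [PySem.List.pyRange_one_eq_nil]
  | succ m ih =>
    rw [show ((m.succ : Int) + 1) = ((m : Int) + 1) + 1 by push_cast; ring,
        PySem.List.pyRange_one_succ_right (by omega),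
        List.foldl_append, ih]
    simp only [List.foldl]
    have hm : PySem.Int.mod ((m : Int) + 1) 4 = ((m : Int) + 1) % 4 :=
      PySem.Int.mod_eq_emod_of_pos (by norm_num)
    rw [hm]
    split_ifs with hz <;> push_cast <;> omega

theorem pv_bounds (year : Int) :
    0 ≤ PySem.Int.mod year 100 ∧ PySem.Int.mod year 100 < 100 := by
  have hm : PySem.Int.mod year 100 = year % 100 := PySem.Int.mod_eq_emod_of_pos (by norm_num)
  constructor
  · rw [hm]; exact Int.emod_nonneg year (by norm_num)
  · rw [hm]; exact Int.emod_lt_of_pos year (by norm_num)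

-- ===== VERDICT (by name: the statement is the Claim_ definition above) =====
theorem get_year_code_spec : Claim_equal_get_year_code := by
  intro year _
  unfold Spec_get_year_code get_year_code get_year_code_alt
  simp only
  obtain ⟨h0, h1⟩ := pv_bounds year
  set n := PySem.Int.mod year 100 with hn
  have hd : PySem.Int.floordiv n 4 = n / 4 := PySem.Int.floordiv_eq_ediv_of_pos (by norm_num)
  have hdm : PySem.Int.mod n 4 = n % 4 := PySem.Int.mod_eq_emod_of_pos (by norm_num)
  rw [pv_code_lookup _ (by rw [hd]; omega) (by rw [hd]; omega)]
  obtain ⟨k, hk⟩ : ∃ k : Nat, n = (k : Int) := ⟨n.toNat, by omega⟩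
  rw [hk, pv_loop_sum]
  set c := PySem.Int.mod (7 - PySem.Int.mod (PySem.Int.floordiv year 100) 4 * 2) 7
  simp only [PySem.Int.floordiv_eq_ediv_of_pos (show (0:Int) < 4 by norm_num),
    PySem.Int.mod_eq_emod_of_pos (show (0:Int) < 7 by norm_num),
    PySem.Int.mod_eq_emod_of_pos (show (0:Int) < 4 by norm_num)]
  omega
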